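-- pv_equiv track=rewrite | github.com/yassine98khater-commits/Satellite-Ground-Station | StudentPredict/tle_manager.py | parse_tle
-- ===== SOURCE A (Python) =====
-- def parse_tle(tle_data):
--     """Parse TLE data into list of satellites"""
--     lines = tle_data.strip().split('\n')
--     satellites = []
--
--     for i in range(0, len(lines), 3):
--         if i + 2 < len(lines):
--             satellites.append({
--                 'name': lines[i].strip(),
--                 'line1': lines[i + 1].strip(),
--                 'line2': lines[i + 2].strip()
--             })
--
--     return satellites
-- ===== SOURCE B (Python) =====
-- def parse_tle(tle_data):
--     """Parse TLE data into list of satellites"""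
--     lines = tle_data.strip().split('\n')
--     names, l1s, l2s = [], [], []
--     for i, line in enumerate(lines):
--         if i % 3 == 0:
--             names.append(line.strip())
--         elif i % 3 == 1:
--             l1s.append(line.strip())
--         else:
--             l2s.append(line.strip())
--     return [{'name': n, 'line1': a, 'line2': b}
--             for n, a, b in zip(names, l1s, l2s)]
-- ===== Notes on version B (the rewrite author's own statement) =====
-- stated objective: alternative
-- what changed: Replaces A's stride-3 index loop with bounds guard and direct record appends by a columnwise deal: one enumerate pass distributes stripped lines round-robin (i % 3) into three column lists (names, line1s, line2s), and zip recombines the columns, its shortest-column truncation dropping any incomplete trailing record.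
import Mathlib
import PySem

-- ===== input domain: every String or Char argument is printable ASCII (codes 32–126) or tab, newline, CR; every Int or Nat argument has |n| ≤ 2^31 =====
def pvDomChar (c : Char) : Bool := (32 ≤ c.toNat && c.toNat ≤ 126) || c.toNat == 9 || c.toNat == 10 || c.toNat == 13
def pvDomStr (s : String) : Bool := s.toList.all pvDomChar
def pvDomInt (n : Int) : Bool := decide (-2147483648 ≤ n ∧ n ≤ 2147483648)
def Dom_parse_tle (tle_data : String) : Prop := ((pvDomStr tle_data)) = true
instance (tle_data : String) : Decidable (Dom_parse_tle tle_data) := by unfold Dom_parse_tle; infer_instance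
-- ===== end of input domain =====

-- B replaces A's stride-3 index loop + bounds guard by a columnwise deal: one enumerate
-- pass distributes stripped lines round-robin (i % 3) into three column lists, and zip
-- recombines the columns; objective: alternative.

-- ===== PORT A =====
-- A: for i in range(0, len(lines), 3) with guard i+2 < len(lines), appending to an accumulator.
def parse_tle (tle_data : String) : List (List (String × String)) :=
  let lines := (PySem.Str.split? (PySem.Str.strip tle_data) "\n").getD []
  (PySem.List.pyRange 0 (lines.length : Int) 3).foldl
    (fun satellites i =>
      if i + 2 < (lines.length : Int) then
        satellites ++ [[("name", PySem.Str.strip (PySem.List.pyGetD lines i "")),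
                        ("line1", PySem.Str.strip (PySem.List.pyGetD lines (i + 1) "")),
                        ("line2", PySem.Str.strip (PySem.List.pyGetD lines (i + 2) ""))]]
      else satellites) []

-- ===== PORT B =====
-- B: for i, line in enumerate(lines): deal line.strip() into one of three columns by i % 3,
-- then list(zip(names, l1s, l2s)) rebuilt as dicts.
def parse_tle_alt (tle_data : String) : List (List (String × String)) :=
  let lines := (PySem.Str.split? (PySem.Str.strip tle_data) "\n").getD []
  let cols := (PySem.List.enumerate lines 0).foldl
    (fun (c : List String × List String × List String) p =>
      if PySem.Int.mod p.1 3 = 0 then (c.1 ++ [PySem.Str.strip p.2], c.2.1, c.2.2)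
      else if PySem.Int.mod p.1 3 = 1 then (c.1, c.2.1 ++ [PySem.Str.strip p.2], c.2.2)
      else (c.1, c.2.1, c.2.2 ++ [PySem.Str.strip p.2])) ([], [], [])
  (cols.1.zip (cols.2.1.zip cols.2.2)).map (fun t =>
    [("name", t.1), ("line1", t.2.1), ("line2", t.2.2)])

-- ===== PRECONDITION & SPEC =====
def Spec_parse_tle (tle_data : String) (out : List (List (String × String))) : Prop := out = parse_tle_alt tle_data
instance (tle_data : String) (out : List (List (String × String))) : Decidable (Spec_parse_tle tle_data out) := by unfold Spec_parse_tle; infer_instance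

-- ===== CLAIM (what is proved, stated in full; the proofs are below) =====
def Claim_equal_parse_tle : Prop := ∀ (tle_data : String), Dom_parse_tle tle_data → Spec_parse_tle tle_data (parse_tle tle_data)

-- ===== LEMMAS AND PROOFS =====

-- the common normal form: the list of complete (name, line1, line2) triples
def pvTriples : List String → List (String × String × String)
  | n :: l1 :: l2 :: rest => (n, l1, l2) :: pvTriples rest
  | _ => []

-- every third element, starting with the head
def pvEvery3 : List String → List String
  | [] => []
  | x :: rest => x :: pvEvery3 (rest.drop 2)
  termination_by l => l.length
  decreasing_by simp

theorem pvEvery3_nil : pvEvery3 [] = [] := by rw [pvEvery3]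

theorem pvEvery3_cons (x : String) (rest : List String) :
    pvEvery3 (x :: rest) = x :: pvEvery3 (rest.drop 2) := by rw [pvEvery3]

theorem pvRange3_nil (a b : Int) (h : b ≤ a) : PySem.List.pyRange a b 3 = [] := by
  rw [PySem.List.pyRange_of_pos a b (by norm_num)]
  rw [if_neg (by omega)]
  simp

theorem pvRange3_cons (a b : Int) (h : a < b) :
    PySem.List.pyRange a b 3 = a :: PySem.List.pyRange (a + 3) b 3 := by
  rw [PySem.List.pyRange_of_pos a b (by norm_num),
      PySem.List.pyRange_of_pos (a + 3) b (by norm_num)]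
  rw [if_pos h]
  by_cases h3 : a + 3 < b
  · rw [if_pos h3]
    have hc : ((b - a + 3 - 1) / 3).toNat = ((b - (a + 3) + 3 - 1) / 3).toNat + 1 := by
      omega
    rw [hc, List.range_succ_eq_map, List.map_cons, List.map_map]
    refine congrArg₂ _ (by ring) (List.map_congr_left ?_)
    intro k _
    simp only [Function.comp_apply]
    push_cast
    ring
  · rw [if_neg h3]
    have hc : ((b - a + 3 - 1) / 3).toNat = 1 := by omega
    rw [hc]
    simp

theorem pvGetD_drop (lines xs : List String) (a k : Nat) (hdrop : lines.drop a = xs)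
    (_hk : k < xs.length) :
    PySem.List.pyGetD lines ((a + k : Nat) : Int) "" = xs.getD k "" := by
  rw [PySem.List.pyGetD_natCast]
  have h1 : lines[a + k]? = xs[k]? := by
    rw [← List.getElem?_drop, hdrop]
  simp [List.getD_eq_getElem?_getD, h1]

-- A's fold computes the map over the triples
theorem pvLoop (lines : List String) : ∀ (xs : List String) (a : Nat),
    lines.drop a = xs → ∀ (acc : List (List (String × String))),
    (PySem.List.pyRange (a : Int) (lines.length : Int) 3).foldl
      (fun satellites i =>
        if i + 2 < (lines.length : Int) then
          satellites ++ [[("name", PySem.Str.strip (PySem.List.pyGetD lines i "")),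
                          ("line1", PySem.Str.strip (PySem.List.pyGetD lines (i + 1) "")),
                          ("line2", PySem.Str.strip (PySem.List.pyGetD lines (i + 2) ""))]]
        else satellites) acc
    = acc ++ (pvTriples xs).map (fun t =>
        [("name", PySem.Str.strip t.1), ("line1", PySem.Str.strip t.2.1),
         ("line2", PySem.Str.strip t.2.2)])
  | [], a, hdrop, acc => by
      have hlen : lines.length - a = 0 := by
        have := congrArg List.length hdrop; simpa using this
      rw [pvRange3_nil _ _ (by omega)]
      simp [pvTriples]
  | [n], a, hdrop, acc => by
      have hlen : lines.length - a = 1 := by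
        have := congrArg List.length hdrop; simpa using this
      have ha : (a : Int) < (lines.length : Int) := by omega
      rw [pvRange3_cons _ _ ha, pvRange3_nil ((a : Int) + 3) _ (by omega)]
      simp only [List.foldl_cons, List.foldl_nil]
      rw [if_neg (by omega)]
      simp [pvTriples]
  | [n, l1], a, hdrop, acc => by
      have hlen : lines.length - a = 2 := by
        have := congrArg List.length hdrop; simpa using this
      have ha : (a : Int) < (lines.length : Int) := by omega
      rw [pvRange3_cons _ _ ha, pvRange3_nil ((a : Int) + 3) _ (by omega)]
      simp only [List.foldl_cons, List.foldl_nil]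
      rw [if_neg (by omega)]
      simp [pvTriples]
  | n :: l1 :: l2 :: rest, a, hdrop, acc => by
      have hlen : lines.length - a = rest.length + 3 := by
        have := congrArg List.length hdrop; simpa using this
      have ha : (a : Int) < (lines.length : Int) := by omega
      rw [pvRange3_cons _ _ ha]
      simp only [List.foldl_cons]
      rw [if_pos (by omega)]
      have hdrop' : lines.drop (a + 3) = rest := by
        rw [← List.drop_drop, hdrop]; rfl
      have g0 : PySem.List.pyGetD lines (a : Int) "" = n := by
        have := pvGetD_drop lines (n :: l1 :: l2 :: rest) a 0 hdrop (by simp)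
        simpa using this
      have g1 : PySem.List.pyGetD lines ((a : Int) + 1) "" = l1 := by
        have := pvGetD_drop lines (n :: l1 :: l2 :: rest) a 1 hdrop (by simp)
        simpa using this
      have g2 : PySem.List.pyGetD lines ((a : Int) + 2) "" = l2 := by
        have := pvGetD_drop lines (n :: l1 :: l2 :: rest) a 2 hdrop (by simp)
        simpa using this
      rw [g0, g1, g2]
      have ih := pvLoop lines rest (a + 3) hdrop'
        (acc ++ [[("name", PySem.Str.strip n), ("line1", PySem.Str.strip l1),
                  ("line2", PySem.Str.strip l2)]])
      have hcast : ((a : Int) + 3) = ((a + 3 : Nat) : Int) := by push_cast; ring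
      rw [hcast, ih]
      simp [pvTriples]
  termination_by xs => xs.length

-- B's dealing fold fills the three columns with every third (stripped) line
theorem pvDeal : ∀ (xs : List String) (a : Int), 0 ≤ a → a % 3 = 0 →
    ∀ (c0 c1 c2 : List String),
    (PySem.List.enumerate xs a).foldl
      (fun (c : List String × List String × List String) p =>
        if PySem.Int.mod p.1 3 = 0 then (c.1 ++ [PySem.Str.strip p.2], c.2.1, c.2.2)
        else if PySem.Int.mod p.1 3 = 1 then (c.1, c.2.1 ++ [PySem.Str.strip p.2], c.2.2)
        else (c.1, c.2.1, c.2.2 ++ [PySem.Str.strip p.2])) (c0, c1, c2)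
    = (c0 ++ (pvEvery3 xs).map PySem.Str.strip,
       c1 ++ (pvEvery3 (xs.drop 1)).map PySem.Str.strip,
       c2 ++ (pvEvery3 (xs.drop 2)).map PySem.Str.strip)
  | [], a, ha0, ha, c0, c1, c2 => by
      simp [PySem.List.enumerate_nil, pvEvery3_nil]
  | [n], a, ha0, ha, c0, c1, c2 => by
      have m0 : PySem.Int.mod a 3 = 0 := by
        simp [PySem.Int.mod, Int.fmod_eq_emod]; omega
      simp only [PySem.List.enumerate_cons, PySem.List.enumerate_nil,
        List.foldl_cons, List.foldl_nil, m0]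
      simp [pvEvery3_cons, pvEvery3_nil]
  | [n, l1], a, ha0, ha, c0, c1, c2 => by
      have m0 : PySem.Int.mod a 3 = 0 := by
        simp [PySem.Int.mod, Int.fmod_eq_emod]; omega
      have m1 : PySem.Int.mod (a + 1) 3 = 1 := by
        simp [PySem.Int.mod, Int.fmod_eq_emod]; omega
      simp only [PySem.List.enumerate_cons, PySem.List.enumerate_nil,
        List.foldl_cons, List.foldl_nil, m0, m1]
      simp [pvEvery3_cons, pvEvery3_nil]
  | n :: l1 :: l2 :: rest, a, ha0, ha, c0, c1, c2 => by
      have m0 : PySem.Int.mod a 3 = 0 := by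
        simp [PySem.Int.mod, Int.fmod_eq_emod]; omega
      have m1 : PySem.Int.mod (a + 1) 3 = 1 := by
        simp [PySem.Int.mod, Int.fmod_eq_emod]; omega
      have m2 : PySem.Int.mod (a + 1 + 1) 3 = 2 := by
        simp [PySem.Int.mod, Int.fmod_eq_emod]; omega
      have ih := pvDeal rest (a + 1 + 1 + 1) (by omega) (by omega)
        (c0 ++ [PySem.Str.strip n]) (c1 ++ [PySem.Str.strip l1]) (c2 ++ [PySem.Str.strip l2])
      simp only [PySem.List.enumerate_cons, List.foldl_cons, m0, m1, m2, if_true,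
        show ((1 : Int) = 0) = False from by norm_num,
        show ((2 : Int) = 0) = False from by norm_num,
        show ((2 : Int) = 1) = False from by norm_num, if_false]
      rw [ih]
      have e0 : pvEvery3 (n :: l1 :: l2 :: rest) = n :: pvEvery3 rest :=
        pvEvery3_cons n (l1 :: l2 :: rest)
      have e1 : pvEvery3 ((n :: l1 :: l2 :: rest).drop 1) = l1 :: pvEvery3 (rest.drop 1) :=
        pvEvery3_cons l1 (l2 :: rest)
      have e2 : pvEvery3 ((n :: l1 :: l2 :: rest).drop 2) = l2 :: pvEvery3 (rest.drop 2) :=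
        pvEvery3_cons l2 rest
      rw [e0, e1, e2]
      simp
  termination_by xs => xs.length

-- zipping the three columns yields exactly the complete triples
theorem pvZip3 : ∀ (l : List String),
    (pvEvery3 l).zip ((pvEvery3 (l.drop 1)).zip (pvEvery3 (l.drop 2))) = pvTriples l
  | [] => by simp [pvEvery3_nil, pvTriples]
  | [n] => by
      rw [show ([n] : List String).drop 1 = [] from rfl,
          show ([n] : List String).drop 2 = [] from rfl, pvEvery3_nil]
      simp [pvTriples]
  | [n, l1] => by
      rw [show ([n, l1] : List String).drop 2 = [] from rfl, pvEvery3_nil]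
      simp [pvTriples]
  | n :: l1 :: l2 :: rest => by
      have e0 : pvEvery3 (n :: l1 :: l2 :: rest) = n :: pvEvery3 rest :=
        pvEvery3_cons n (l1 :: l2 :: rest)
      have e1 : pvEvery3 ((n :: l1 :: l2 :: rest).drop 1) = l1 :: pvEvery3 (rest.drop 1) :=
        pvEvery3_cons l1 (l2 :: rest)
      have e2 : pvEvery3 ((n :: l1 :: l2 :: rest).drop 2) = l2 :: pvEvery3 (rest.drop 2) :=
        pvEvery3_cons l2 rest
      rw [e0, e1, e2]
      simp only [List.zip_cons_cons]
      rw [pvZip3 rest]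
      rfl
  termination_by l => l.length

theorem pvFinal (lines : List String) :
    (PySem.List.pyRange 0 (lines.length : Int) 3).foldl
      (fun satellites i =>
        if i + 2 < (lines.length : Int) then
          satellites ++ [[("name", PySem.Str.strip (PySem.List.pyGetD lines i "")),
                          ("line1", PySem.Str.strip (PySem.List.pyGetD lines (i + 1) "")),
                          ("line2", PySem.Str.strip (PySem.List.pyGetD lines (i + 2) ""))]]
        else satellites) []
    = (fun (cols : List String × List String × List String) =>
        (cols.1.zip (cols.2.1.zip cols.2.2)).map (fun t =>
          [("name", t.1), ("line1", t.2.1), ("line2", t.2.2)]))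
        ((PySem.List.enumerate lines 0).foldl
          (fun (c : List String × List String × List String) p =>
            if PySem.Int.mod p.1 3 = 0 then (c.1 ++ [PySem.Str.strip p.2], c.2.1, c.2.2)
            else if PySem.Int.mod p.1 3 = 1 then (c.1, c.2.1 ++ [PySem.Str.strip p.2], c.2.2)
            else (c.1, c.2.1, c.2.2 ++ [PySem.Str.strip p.2])) ([], [], [])) := by
  have hA := pvLoop lines lines 0 rfl []
  simp only [Nat.cast_zero, List.nil_append] at hA
  rw [hA, pvDeal lines 0 (by norm_num) (by norm_num)]
  simp only [List.nil_append, List.zip_map, List.map_map]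
  rw [pvZip3 lines]
  apply List.map_congr_left
  rintro ⟨x, y, z⟩ _
  rfl

-- ===== VERDICT (by name: the statement is the Claim_ definition above) =====
theorem parse_tle_spec : Claim_equal_parse_tle := by
  intro s _
  unfold Spec_parse_tle parse_tle parse_tle_alt
  exact pvFinal ((PySem.Str.split? (PySem.Str.strip s) "\n").getD [])
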